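-- pv_equiv track=rewrite | github.com/martian17/qiskit-graph-coloring-hamiltonian | W_M.py | genvec
-- ===== SOURCE A (Python) =====
-- def genvec(veclen, n):
--     vec = []
--     veclen = int(veclen/2)
--     while veclen > 0:
--         if veclen <= n:
--             n = n - veclen
--             vec.append(1)
--         else:
--             vec.append(0)
--
--         veclen = int(veclen/2)
--         vec.reverse()
--     return vec
-- ===== SOURCE B (Python) =====
-- from collections import deque
--
-- def genvec(veclen, n):
--     # pass 1: extract greedy bits in generation order
--     bits = []
--     veclen = int(veclen/2)
--     while veclen > 0:
--         if veclen <= n: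
--             n = n - veclen
--             bits.append(1)
--         else:
--             bits.append(0)
--         veclen = int(veclen/2)
--     # pass 2: reproduce A's per-step reversal with a deque and a flip flag
--     d = deque()
--     flip = False
--     for b in bits:
--         if flip:
--             d.appendleft(b)
--         else:
--             d.append(b)
--         flip = not flip
--     return list(reversed(d)) if flip else list(d)
-- ===== Notes on version B (the rewrite author's own statement) =====
-- stated objective: alternative
-- what changed: Split A's single loop that reverses the accumulator after every iteration into a bit-extraction pass followed by a deque assembly with an alternating-end flag (one final reversal at most), removing the per-iteration reverse.
import Mathlib
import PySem

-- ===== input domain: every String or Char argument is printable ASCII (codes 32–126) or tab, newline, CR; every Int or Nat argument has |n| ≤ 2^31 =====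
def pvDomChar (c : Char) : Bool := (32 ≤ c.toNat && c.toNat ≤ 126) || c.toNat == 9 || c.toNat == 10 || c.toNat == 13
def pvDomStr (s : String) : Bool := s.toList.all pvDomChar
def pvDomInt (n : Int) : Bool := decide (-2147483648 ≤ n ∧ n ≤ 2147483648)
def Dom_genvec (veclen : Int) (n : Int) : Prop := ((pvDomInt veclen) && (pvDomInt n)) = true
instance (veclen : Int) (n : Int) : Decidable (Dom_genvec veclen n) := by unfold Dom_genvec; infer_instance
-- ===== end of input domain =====

-- B splits A's interleaved append-and-reverse loop into a bit-extraction pass plus a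
-- deque assembly with an alternating-end flag (objective: alternative decomposition, no speed claim).


-- ===== PORT A =====
-- A's while loop: append a bit, halve (int(veclen/2) = truncating division, exact for |veclen| ≤ 2^31), reverse.
def genvecLoop (veclen : Int) (n : Int) (vec : List Int) : List Int :=
  if h : veclen > 0 then
    if veclen ≤ n then
      genvecLoop (veclen.tdiv 2) (n - veclen) (vec ++ [1]).reverse
    else
      genvecLoop (veclen.tdiv 2) n (vec ++ [0]).reverse
  else vec
termination_by veclen.toNat
decreasing_by
  · have e : veclen.tdiv 2 = veclen / 2 := Int.tdiv_eq_ediv_of_nonneg h.le; omega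
  · have e : veclen.tdiv 2 = veclen / 2 := Int.tdiv_eq_ediv_of_nonneg h.le; omega

def genvec (veclen : Int) (n : Int) : List Int :=
  genvecLoop (veclen.tdiv 2) n []

-- ===== PORT B =====
-- pass 1: the greedy bits in generation order
def genvecBits (veclen : Int) (n : Int) : List Int :=
  if h : veclen > 0 then
    if veclen ≤ n then 1 :: genvecBits (veclen.tdiv 2) (n - veclen)
    else 0 :: genvecBits (veclen.tdiv 2) n
  else []
termination_by veclen.toNat
decreasing_by
  · have e : veclen.tdiv 2 = veclen / 2 := Int.tdiv_eq_ediv_of_nonneg h.le; omega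
  · have e : veclen.tdiv 2 = veclen / 2 := Int.tdiv_eq_ediv_of_nonneg h.le; omega

-- pass 2: deque assembly; deque as a list, appendleft = cons, append = ++ [b]; flip toggles each step
def dequeStep (st : List Int × Bool) (b : Int) : List Int × Bool :=
  match st with
  | (d, flip) => if flip then (b :: d, false) else (d ++ [b], true)

def genvec_alt (veclen : Int) (n : Int) : List Int :=
  let bits := genvecBits (veclen.tdiv 2) n
  let st := bits.foldl dequeStep ([], false)
  if st.2 then st.1.reverse else st.1

-- ===== PRECONDITION & SPEC =====
def Spec_genvec (veclen : Int) (n : Int) (out : List Int) : Prop := out = genvec_alt veclen n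
instance (veclen : Int) (n : Int) (out : List Int) : Decidable (Spec_genvec veclen n out) := by unfold Spec_genvec; infer_instance

-- ===== CLAIM (what is proved, stated in full; the proofs are below) =====
def Claim_equal_genvec : Prop := ∀ (veclen : Int) (n : Int), Dom_genvec veclen n → Spec_genvec veclen n (genvec veclen n)

-- ===== LEMMAS AND PROOFS =====

def dequeFin (st : List Int × Bool) : List Int := if st.2 then st.1.reverse else st.1

-- a flipped start with a reversed deque yields the same finalized result
theorem dequeFlip (bs : List Int) :
    ∀ (d : List Int) (f : Bool),
      dequeFin ((bs.foldl dequeStep (d, f))) = (dequeFin (bs.foldl dequeStep (d.reverse, !f))) := by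
  induction bs with
  | nil =>
    intro d f
    cases f <;> simp [dequeFin]
  | cons b bs ih =>
    intro d f
    cases f with
    | false =>
      have := ih (d ++ [b]) true
      simpa [dequeStep, List.foldl_cons] using this
    | true =>
      have := ih (b :: d) false
      simpa [dequeStep, List.foldl_cons] using this

theorem genvecLoop_eq (veclen n : Int) (vec : List Int) :
    genvecLoop veclen n vec = dequeFin ((genvecBits veclen n).foldl dequeStep (vec, false)) := by
  induction veclen, n, vec using genvecLoop.induct with
  | case1 v n vec h hle ih =>
    rw [genvecLoop, genvecBits]
    simp only [h, hle, dif_pos, if_pos]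
    rw [ih]
    have := dequeFlip (genvecBits (v.tdiv 2) (n - v)) (vec ++ [1]) true
    simp only [Bool.not_true, List.reverse_append] at this ⊢
    simpa [dequeStep, List.foldl_cons] using this.symm
  | case2 v n vec h hle ih =>
    rw [genvecLoop, genvecBits]
    simp only [h, hle, dif_pos]
    rw [ih]
    have := dequeFlip (genvecBits (v.tdiv 2) n) (vec ++ [0]) true
    simp only [Bool.not_true, List.reverse_append] at this ⊢
    simpa [dequeStep, List.foldl_cons] using this.symm
  | case3 v n vec h =>
    rw [genvecLoop, genvecBits]
    simp [h, dequeFin]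

-- ===== VERDICT (by name: the statement is the Claim_ definition above) =====
theorem genvec_spec : Claim_equal_genvec := by
  intro veclen n _
  unfold Spec_genvec genvec genvec_alt
  simp [genvecLoop_eq]
  rfl
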